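-- pv_equiv track=rewrite | github.com/thealper2/codewars-solutions | 7-kyu/prison_break.py | freed_prisoners
-- ===== SOURCE A (Python) =====
-- def freed_prisoners(prison):
--     if not prison[0]:
--         return 0
--
--     count = 0
--     i = 0
--     while i < len(prison):
--         if prison[i]:
--             count += 1
--             new_prison = []
--             for j in range(i + 1, len(prison)):
--                 new_prison.append(not prison[j])
--
--             prison = new_prison
--             i = 0
--         else:
--             i += 1
--
--     return count
-- ===== SOURCE B (Python) =====
-- def freed_prisoners(prison):
--     if not prison[0]:
--         return 0
--     count = 0
--     for cell in prison:
--         if bool(cell) != (count % 2 == 1):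
--             count += 1
--     return count
-- ===== Notes on version B (the rewrite author's own statement) =====
-- stated objective: alternative
-- what changed: Replaced the restart-and-rebuild simulation (each release copies and negates the remaining list and rescans from index 0) with a single left-to-right pass where the release count's parity tells whether a cell is currently toggled.
import Mathlib
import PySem

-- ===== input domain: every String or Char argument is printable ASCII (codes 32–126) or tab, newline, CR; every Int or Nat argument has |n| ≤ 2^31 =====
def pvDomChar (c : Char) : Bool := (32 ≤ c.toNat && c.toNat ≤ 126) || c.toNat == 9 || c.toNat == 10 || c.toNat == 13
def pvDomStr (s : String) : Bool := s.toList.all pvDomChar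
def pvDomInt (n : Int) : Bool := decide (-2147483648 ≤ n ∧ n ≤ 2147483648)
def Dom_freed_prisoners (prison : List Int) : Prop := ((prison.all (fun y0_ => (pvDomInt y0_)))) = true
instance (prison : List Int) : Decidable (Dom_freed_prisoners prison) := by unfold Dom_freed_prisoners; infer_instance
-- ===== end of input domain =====

-- B replaces A's rebuild-and-rescan simulation by one left-to-right pass tracking toggle parity (alternative algorithm; both raise on the empty list, excluded by Pre_).


-- ===== PORT A =====
-- `not prison[j]` produces a Python bool; only its truthiness matters downstream, encoded as 1/0.
def pvNotCell (x : Int) : Int := if x ≠ 0 then 0 else 1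

-- A's while loop: state (prison, count, i); on a truthy cell rebuild the negated tail and restart at 0.
def freedGoA (p : List Int) (count : Int) (i : Nat) : Int :=
  if h : i < p.length then
    if p[i] ≠ 0 then
      freedGoA ((p.drop (i + 1)).map pvNotCell) (count + 1) 0
    else
      freedGoA p count (i + 1)
  else count
termination_by (p.length, p.length - i)
decreasing_by
  · left; simp; omega
  · right; omega

def freed_prisoners (prison : List Int) : Int :=
  match prison with
  | [] => 0          -- unreachable under Pre_ (Python A raises IndexError on [])
  | h :: _ => if h = 0 then 0 else freedGoA prison 0 0

-- ===== PORT B =====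
def freed_prisoners_alt (prison : List Int) : Int :=
  match prison with
  | [] => 0          -- unreachable under Pre_ (Python B raises IndexError on [])
  | h :: _ =>
    if h = 0 then 0
    else prison.foldl
      (fun count x => if (decide (x ≠ 0)) != (decide (count % 2 = 1)) then count + 1 else count) 0

-- ===== PRECONDITION & SPEC =====
-- Both Pythons index the first element unconditionally, so they raise IndexError on the empty list.
def Pre_freed_prisoners (prison : List Int) : Prop := prison ≠ []
instance (prison : List Int) : Decidable (Pre_freed_prisoners prison) := by
  unfold Pre_freed_prisoners; infer_instance
def pvWitness_freed_prisoners : List Int := [1, 0, 1]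

def Spec_freed_prisoners (prison : List Int) (out : Int) : Prop := out = freed_prisoners_alt prison
instance (prison : List Int) (out : Int) : Decidable (Spec_freed_prisoners prison out) := by unfold Spec_freed_prisoners; infer_instance

-- ===== CLAIM (what is proved, stated in full; the proofs are below) =====
def Claim_equal_freed_prisoners : Prop := ∀ (prison : List Int), Dom_freed_prisoners prison → Pre_freed_prisoners prison → Spec_freed_prisoners prison (freed_prisoners prison)

-- ===== LEMMAS AND PROOFS =====

-- Reference count: cells freed scanning l left to right with current toggle parity b.
def freedCnt : List Int → Bool → Int
  | [], _ => 0
  | x :: xs, b => if (decide (x ≠ 0)) != b then 1 + freedCnt xs (!b) else freedCnt xs b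

theorem freedCnt_map_not (l : List Int) (b : Bool) :
    freedCnt (l.map pvNotCell) b = freedCnt l (!b) := by
  induction l generalizing b with
  | nil => simp [freedCnt]
  | cons x xs ih =>
    by_cases hx : x = 0 <;> cases b <;> simp [freedCnt, pvNotCell, hx, ih]

theorem freedGoA_eq (p : List Int) (count : Int) (i : Nat) :
    freedGoA p count i = count + freedCnt (p.drop i) false := by
  induction p, count, i using freedGoA.induct with
  | case1 p count i h hx ih =>
    rw [freedGoA, dif_pos h, if_pos hx, ih]
    rw [List.drop_eq_getElem_cons h, freedCnt]
    rw [if_pos (by simp [hx])]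
    simp only [List.drop_zero, freedCnt_map_not, Bool.not_false]
    ring
  | case2 p count i h hx ih =>
    rw [freedGoA, dif_pos h, if_neg hx, ih]
    rw [List.drop_eq_getElem_cons h, freedCnt]
    simp [hx]
  | case3 p count i h =>
    rw [freedGoA, dif_neg h]
    simp at h
    simp [List.drop_eq_nil_of_le h, freedCnt]

theorem freedFold_eq (l : List Int) (c : Int) :
    l.foldl (fun count x => if (decide (x ≠ 0)) != (decide (count % 2 = 1)) then count + 1 else count) c
      = c + freedCnt l (decide (c % 2 = 1)) := by
  induction l generalizing c with
  | nil => simp [freedCnt]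
  | cons x xs ih =>
    simp only [List.foldl_cons, freedCnt]
    by_cases hb : (decide (x ≠ 0)) != (decide (c % 2 = 1))
    · rw [if_pos hb, if_pos hb, ih]
      have : decide ((c + 1) % 2 = 1) = !decide (c % 2 = 1) := by
        by_cases hc : c % 2 = 1 <;> simp [hc] <;> omega
      rw [this]; ring
    · rw [if_neg hb, if_neg hb, ih]

-- ===== VERDICT (by name: the statement is the Claim_ definition above) =====
theorem freed_prisoners_spec : Claim_equal_freed_prisoners := by
  intro prison _ hpre
  unfold Spec_freed_prisoners
  match prison with
  | [] => exact absurd rfl hpre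
  | h :: t =>
    by_cases hh : h = 0
    · simp [freed_prisoners, freed_prisoners_alt, hh]
    · simp only [freed_prisoners, freed_prisoners_alt, hh, if_neg]
      rw [freedGoA_eq, freedFold_eq]
      norm_num
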